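-- pv_equiv track=rewrite | github.com/Cyfroni/CG_1 | src/algorithms/marriage_before_conquest2.py | separate3Sets
-- ===== SOURCE A (Python) =====
-- def separate3Sets(pl, pr, slope, median):
--     small = []
--     equal = []
--     big = []
--     smallr = []
--     equalr = []
--     bigr = []
--     for i in range(len(slope)):
--         if (slope[i] == median):
--             equalr.append(pr[i])
--             equal.append(pl[i])
--         elif (slope[i] > median):
--             bigr.append(pr[i])
--             big.append(pl[i])
--         else:
--             smallr.append(pr[i])
--             small.append(pl[i])
--     return small, equal, big, smallr, equalr, bigr
-- ===== SOURCE B (Python) =====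
-- def separate3Sets(pl, pr, slope, median):
--     small = [pl[i] for i in range(len(slope)) if slope[i] < median]
--     equal = [pl[i] for i in range(len(slope)) if slope[i] == median]
--     big = [pl[i] for i in range(len(slope)) if slope[i] > median]
--     smallr = [pr[i] for i in range(len(slope)) if slope[i] < median]
--     equalr = [pr[i] for i in range(len(slope)) if slope[i] == median]
--     bigr = [pr[i] for i in range(len(slope)) if slope[i] > median]
--     return small, equal, big, smallr, equalr, bigr
-- ===== Notes on version B (the rewrite author's own statement) =====
-- stated objective: idiomatic
-- what changed: Replaces the single bucketing loop with mutable accumulators by six independent list comprehensions, one per output group, each selecting indices by its own slope-vs-median comparison.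
import Mathlib
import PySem

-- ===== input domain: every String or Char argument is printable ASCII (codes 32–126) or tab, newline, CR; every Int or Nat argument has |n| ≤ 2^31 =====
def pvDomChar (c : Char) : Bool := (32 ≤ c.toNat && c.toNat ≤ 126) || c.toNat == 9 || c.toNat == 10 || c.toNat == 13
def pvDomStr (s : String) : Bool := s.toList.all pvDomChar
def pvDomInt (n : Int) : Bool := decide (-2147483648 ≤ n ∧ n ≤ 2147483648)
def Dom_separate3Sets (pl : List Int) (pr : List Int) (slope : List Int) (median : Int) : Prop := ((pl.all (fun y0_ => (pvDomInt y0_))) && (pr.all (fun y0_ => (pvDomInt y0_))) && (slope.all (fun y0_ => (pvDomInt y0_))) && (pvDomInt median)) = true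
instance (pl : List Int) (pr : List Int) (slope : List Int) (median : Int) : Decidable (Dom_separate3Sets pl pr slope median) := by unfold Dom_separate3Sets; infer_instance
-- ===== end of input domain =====

-- B replaces A's single bucketing loop by six independent comprehensions (one per group); idiomatic, same O(n) cost.


-- ===== PORT A =====
-- loop body of A (appends pr[i]/pl[i] to the bucket chosen by slope[i] vs median);
-- pyGetD … 0 is exact here because Pre_ guarantees every index is in range
def sep3Step (pl : List Int) (pr : List Int) (slope : List Int) (median : Int)
    (st : List Int × List Int × List Int × List Int × List Int × List Int) (i : Int) :
    List Int × List Int × List Int × List Int × List Int × List Int :=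
  let (small, equal, big, smallr, equalr, bigr) := st
  if PySem.List.pyGetD slope i 0 = median then
    (small, equal ++ [PySem.List.pyGetD pl i 0], big, smallr, equalr ++ [PySem.List.pyGetD pr i 0], bigr)
  else if PySem.List.pyGetD slope i 0 > median then
    (small, equal, big ++ [PySem.List.pyGetD pl i 0], smallr, equalr, bigr ++ [PySem.List.pyGetD pr i 0])
  else
    (small ++ [PySem.List.pyGetD pl i 0], equal, big, smallr ++ [PySem.List.pyGetD pr i 0], equalr, bigr)

def separate3Sets (pl : List Int) (pr : List Int) (slope : List Int) (median : Int) :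
    List Int × List Int × List Int × List Int × List Int × List Int :=
  (PySem.List.pyRange 0 slope.length 1).foldl (sep3Step pl pr slope median) ([], [], [], [], [], [])

-- ===== PORT B =====
-- six comprehensions over range(len(slope)); pyGetD … 0 exact under Pre_
def separate3Sets_alt (pl : List Int) (pr : List Int) (slope : List Int) (median : Int) :
    List Int × List Int × List Int × List Int × List Int × List Int :=
  let idx := PySem.List.pyRange 0 slope.length 1
  ((idx.filter (fun i => PySem.List.pyGetD slope i 0 < median)).map (fun i => PySem.List.pyGetD pl i 0),
   (idx.filter (fun i => PySem.List.pyGetD slope i 0 = median)).map (fun i => PySem.List.pyGetD pl i 0),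
   (idx.filter (fun i => PySem.List.pyGetD slope i 0 > median)).map (fun i => PySem.List.pyGetD pl i 0),
   (idx.filter (fun i => PySem.List.pyGetD slope i 0 < median)).map (fun i => PySem.List.pyGetD pr i 0),
   (idx.filter (fun i => PySem.List.pyGetD slope i 0 = median)).map (fun i => PySem.List.pyGetD pr i 0),
   (idx.filter (fun i => PySem.List.pyGetD slope i 0 > median)).map (fun i => PySem.List.pyGetD pr i 0))

-- ===== PRECONDITION & SPEC =====
-- A raises IndexError when slope is longer than pl or pr (it indexes both at every i < len(slope)); Pre_ excludes exactly those inputs.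
def Pre_separate3Sets (pl : List Int) (pr : List Int) (slope : List Int) (median : Int) : Prop :=
  slope.length ≤ pl.length ∧ slope.length ≤ pr.length
instance (pl : List Int) (pr : List Int) (slope : List Int) (median : Int) : Decidable (Pre_separate3Sets pl pr slope median) := by unfold Pre_separate3Sets; infer_instance
def pvWitness_separate3Sets : List Int × List Int × List Int × Int := ([1, 2, 3], [4, 5, 6], [0, 2, -1], 1)
def Spec_separate3Sets (pl : List Int) (pr : List Int) (slope : List Int) (median : Int) (out : List Int × List Int × List Int × List Int × List Int × List Int) : Prop := out = separate3Sets_alt pl pr slope median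
instance (pl : List Int) (pr : List Int) (slope : List Int) (median : Int) (out : List Int × List Int × List Int × List Int × List Int × List Int) : Decidable (Spec_separate3Sets pl pr slope median out) := by unfold Spec_separate3Sets; infer_instance

-- ===== CLAIM (what is proved, stated in full; the proofs are below) =====
def Claim_equal_separate3Sets : Prop := ∀ (pl : List Int) (pr : List Int) (slope : List Int) (median : Int), Dom_separate3Sets pl pr slope median → Pre_separate3Sets pl pr slope median → Spec_separate3Sets pl pr slope median (separate3Sets pl pr slope median)

-- ===== LEMMAS AND PROOFS =====
-- the fold over range(0,n) equals the six comprehensions over range(0,n), by induction on n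
theorem sep3_main (pl pr slope : List Int) (median : Int) : ∀ (n : Nat),
    (PySem.List.pyRange 0 n 1).foldl (sep3Step pl pr slope median) ([], [], [], [], [], []) =
    (((PySem.List.pyRange 0 n 1).filter (fun i => PySem.List.pyGetD slope i 0 < median)).map (fun i => PySem.List.pyGetD pl i 0),
     ((PySem.List.pyRange 0 n 1).filter (fun i => PySem.List.pyGetD slope i 0 = median)).map (fun i => PySem.List.pyGetD pl i 0),
     ((PySem.List.pyRange 0 n 1).filter (fun i => PySem.List.pyGetD slope i 0 > median)).map (fun i => PySem.List.pyGetD pl i 0),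
     ((PySem.List.pyRange 0 n 1).filter (fun i => PySem.List.pyGetD slope i 0 < median)).map (fun i => PySem.List.pyGetD pr i 0),
     ((PySem.List.pyRange 0 n 1).filter (fun i => PySem.List.pyGetD slope i 0 = median)).map (fun i => PySem.List.pyGetD pr i 0),
     ((PySem.List.pyRange 0 n 1).filter (fun i => PySem.List.pyGetD slope i 0 > median)).map (fun i => PySem.List.pyGetD pr i 0)) := by
  intro n
  induction n with
  | zero => simp
  | succ k ih =>
    have hc : ((k + 1 : Nat) : Int) = (k : Int) + 1 := by push_cast; ring
    rw [hc, PySem.List.pyRange_one_succ_right (by exact_mod_cast Nat.zero_le k)]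
    rcases lt_trichotomy ((slope[k]?).getD 0) median with h | h | h
    · simp [List.foldl_append, List.filter_append, List.map_append, ih, sep3Step,
        List.getD_eq_getElem?_getD, h, h.ne, not_lt.mpr h.le]
    · simp [List.foldl_append, List.filter_append, List.map_append, ih, sep3Step,
        List.getD_eq_getElem?_getD, h]
    · simp [List.foldl_append, List.filter_append, List.map_append, ih, sep3Step,
        List.getD_eq_getElem?_getD, h, h.ne', not_lt.mpr h.le]

-- ===== VERDICT (by name: the statement is the Claim_ definition above) =====
theorem separate3Sets_spec : Claim_equal_separate3Sets := by
  intro pl pr slope median _ _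
  unfold Spec_separate3Sets separate3Sets separate3Sets_alt
  exact sep3_main pl pr slope median slope.length
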